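-- pv_equiv track=rewrite | github.com/yudai-patronai/problembook | problems/graphs/simple/sources_and_sinks/solution.py | solution
-- ===== SOURCE A (Python) =====
-- def solution(n, A):
--     istok = []
--     stok = []
--
--     for i in range(n):
--         if sum(A[i]) == 0:
--             stok.append(i+1)
--     stok.sort()
--
--     for i in range(n):
--         if sum([sub_list[i] for sub_list in A]) == 0:
--             istok.append(i+1)
--     istok.sort()
--
--     return stok, istok
-- ===== SOURCE B (Python) =====
-- def solution(n, A):
--     m = max(n, 0)
--     rowsum = []
--     colsum = [0] * m
--     for row in A:
--         rowsum.append(sum(row))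
--         colsum = [c + v for c, v in zip(colsum, row)]
--     stok = [i + 1 for i in range(n) if rowsum[i] == 0]
--     istok = [j + 1 for j in range(n) if colsum[j] == 0]
--     return stok, istok
-- ===== Notes on version B (the rewrite author's own statement) =====
-- stated objective: alternative
-- what changed: Replaces A's two passes - one re-scanning the whole matrix per column (building a fresh column list for each j) plus two redundant sorts - by a single fold over the rows that accumulates all row sums and all column sums at once, then two index scans with no sort.
import Mathlib
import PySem

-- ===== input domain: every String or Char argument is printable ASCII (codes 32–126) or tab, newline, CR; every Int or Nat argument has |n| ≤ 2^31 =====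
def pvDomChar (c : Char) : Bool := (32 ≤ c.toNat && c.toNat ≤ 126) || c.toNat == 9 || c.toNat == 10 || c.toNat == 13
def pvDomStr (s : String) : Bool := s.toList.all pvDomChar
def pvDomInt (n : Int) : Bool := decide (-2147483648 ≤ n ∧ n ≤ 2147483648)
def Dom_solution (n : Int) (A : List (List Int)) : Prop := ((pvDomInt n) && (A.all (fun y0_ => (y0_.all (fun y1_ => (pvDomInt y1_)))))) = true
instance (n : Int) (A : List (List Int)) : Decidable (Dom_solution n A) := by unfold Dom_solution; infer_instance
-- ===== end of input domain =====

-- B replaces A's per-column full re-scan of the matrix (and the redundant sorts) by a single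
-- pass that accumulates all row sums and column sums at once (objective: alternative).

-- ===== PORT A =====
def solution (n : Int) (A : List (List Int)) : List Int × List Int :=
  let stok := (PySem.List.pyRange 0 n).foldl
      (fun acc i => if (PySem.List.pyGetD A i []).sum == 0 then acc ++ [i + 1] else acc) []
  let stok := PySem.List.sorted stok (fun x => x)
  let istok := (PySem.List.pyRange 0 n).foldl
      (fun acc i => if (A.map (fun sub_list => PySem.List.pyGetD sub_list i 0)).sum == 0
                    then acc ++ [i + 1] else acc) []
  let istok := PySem.List.sorted istok (fun x => x)
  (stok, istok)

-- ===== PORT B =====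
def solution_alt (n : Int) (A : List (List Int)) : List Int × List Int :=
  let m := max n 0
  let rc := A.foldl
      (fun (acc : List Int × List Int) row =>
        (acc.1 ++ [row.sum], List.zipWith (fun c v => c + v) acc.2 row))
      ([], List.replicate m.toNat 0)
  let stok := (PySem.List.pyRange 0 n).foldl
      (fun acc i => if PySem.List.pyGetD rc.1 i 0 == 0 then acc ++ [i + 1] else acc) []
  let istok := (PySem.List.pyRange 0 n).foldl
      (fun acc j => if PySem.List.pyGetD rc.2 j 0 == 0 then acc ++ [j + 1] else acc) []
  (stok, istok)

-- ===== PRECONDITION & SPEC =====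
-- Pre_ excludes exactly the inputs on which Python A raises IndexError: it needs n ≤ len(A)
-- and every row of length ≥ n (for n ≤ 0 both loops are empty and Pre_ holds vacuously).
def Pre_solution (n : Int) (A : List (List Int)) : Prop :=
  n ≤ (A.length : Int) ∧ ∀ row ∈ A, n ≤ (row.length : Int)
instance (n : Int) (A : List (List Int)) : Decidable (Pre_solution n A) := by
  unfold Pre_solution; infer_instance

def pvWitness_solution : Int × List (List Int) := (2, [[0, 1], [1, 0]])

def Spec_solution (n : Int) (A : List (List Int)) (out : List Int × List Int) : Prop := out = solution_alt n A
instance (n : Int) (A : List (List Int)) (out : List Int × List Int) : Decidable (Spec_solution n A out) := by unfold Spec_solution; infer_instance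

-- ===== CLAIM (what is proved, stated in full; the proofs are below) =====
def Claim_equal_solution : Prop := ∀ (n : Int) (A : List (List Int)), Dom_solution n A → Pre_solution n A → Spec_solution n A (solution n A)

-- ===== LEMMAS AND PROOFS =====

-- the pair-state fold of B computes its two components independently
theorem pv_rc (A : List (List Int)) (b c : List Int) :
    A.foldl (fun acc row => (acc.1 ++ [row.sum], List.zipWith (fun c v => c + v) acc.2 row)) (b, c)
      = (A.foldl (fun a row => a ++ [row.sum]) b,
         A.foldl (fun c r => List.zipWith (fun c v => c + v) c r) c) := by
  induction A generalizing b c with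
  | nil => rfl
  | cons r A ih => simpa using ih (b ++ [r.sum]) (List.zipWith (fun c v => c + v) c r)

-- closed form of B's column accumulator
theorem pv_colfold (A : List (List Int)) : ∀ (cs : List Int),
    (∀ row ∈ A, cs.length ≤ row.length) →
    A.foldl (fun c r => List.zipWith (fun c v => c + v) c r) cs
      = (List.range cs.length).map
          (fun k => cs.getD k 0 + (A.map (fun r => r.getD k 0)).sum) := by
  induction A with
  | nil =>
      intro cs _
      apply List.ext_getElem (by simp)
      intro i h1 h2
      simp only [List.length_map, List.length_range] at h2
      simp only [List.foldl_nil, List.getElem_map, List.getElem_range, List.map_nil,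
        List.sum_nil, add_zero]
      rw [List.getD_eq_getElem cs 0 h2]
  | cons r A ih =>
      intro cs h
      have hr : cs.length ≤ r.length := h r (by simp)
      have hlen : (List.zipWith (fun c v => c + v) cs r).length = cs.length := by
        simp [List.length_zipWith]; omega
      simp only [List.foldl_cons]
      rw [ih _ (by intro row hrow; rw [hlen]; exact h row (by simp [hrow]))]
      rw [hlen]
      apply List.ext_getElem (by simp)
      intro i h1 h2
      simp only [List.length_map, List.length_range] at h1 h2
      simp only [List.getElem_map, List.getElem_range, List.map_cons, List.sum_cons]
      rw [List.getD_eq_getElem _ 0 (by omega), List.getElem_zipWith,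
          List.getD_eq_getElem cs 0 h1, List.getD_eq_getElem r 0 (by omega)]
      ring

-- a strictly increasing list is left unchanged by PySem's sort
theorem pv_sorted_filter_range (n : Int) (p : Int → Bool) :
    PySem.List.sorted ((((PySem.List.pyRange 0 n).filter p).map (fun i => i + 1))) (fun x => x)
      = ((PySem.List.pyRange 0 n).filter p).map (fun i => i + 1) := by
  apply PySem.List.sorted_eq_self_of_pairwise
  refine List.Pairwise.map _ (fun a b hab => ?_) ((PySem.List.pairwise_lt_pyRange_one 0 n).filter p)
  omega

theorem solution_eq (n : Int) (A : List (List Int)) (hpre : Pre_solution n A) :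
    solution n A = solution_alt n A := by
  obtain ⟨hA, hrows⟩ := hpre
  have hcslen : ∀ row ∈ A, (List.replicate (max n 0).toNat (0 : Int)).length ≤ row.length := by
    intro row hrow
    have := hrows row hrow
    simp only [List.length_replicate]
    omega
  simp only [solution, solution_alt, pv_rc, PySem.List.foldl_append_singleton_eq_map,
    pv_colfold A _ hcslen, List.nil_append, List.length_replicate,
    PySem.List.foldl_append_if, pv_sorted_filter_range, Prod.mk.injEq]
  constructor
  · -- stok: row-sum tests agree on every i in range
    congr 1
    apply List.filter_congr
    intro i hi
    have hmem := PySem.List.mem_pyRange_one.mp (by simpa using hi)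
    have h0 : (0:Int) ≤ i := hmem.1
    have hin : i < (A.length : Int) := by omega
    have : PySem.List.pyGetD (A.map List.sum) i 0
        = (PySem.List.pyGetD A i []).sum := by
      have := PySem.List.pyGetD_map List.sum A i []
      simpa using this
    rw [this]
  · -- istok: column-sum tests agree on every i in range
    congr 1
    apply List.filter_congr
    intro i hi
    have hmem := PySem.List.mem_pyRange_one.mp (by simpa using hi)
    have h0 : (0:Int) ≤ i := hmem.1
    have hiN : i.toNat < (max n 0).toNat := by omega
    have hlenmap : i < ((List.range (max n 0).toNat).map
        (fun k => (List.replicate (max n 0).toNat (0:Int)).getD k 0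
          + (A.map (fun r => r.getD k 0)).sum)).length := by
      simp; omega
    rw [PySem.List.pyGetD_eq_getElem _ 0 h0 (by simpa using hlenmap)]
    simp only [List.getElem_map, List.getElem_range]
    rw [List.getD_eq_getElem _ 0 (by simpa using hiN)]
    simp only [List.getElem_replicate, zero_add]
    have hmapeq : A.map (fun r => r.getD i.toNat 0)
        = A.map (fun sub_list => PySem.List.pyGetD sub_list i 0) := by
      apply List.map_congr_left
      intro r hr
      have hrl := hrows r hr
      rw [PySem.List.pyGetD_eq_getElem r 0 h0 (by omega)]
      rw [List.getD_eq_getElem r 0 (by omega)]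
    rw [hmapeq]

-- ===== VERDICT (by name: the statement is the Claim_ definition above) =====
theorem solution_spec : Claim_equal_solution := by
  intro n A _ hpre
  exact solution_eq n A hpre
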